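-- pv_equiv track=rewrite | github.com/Rubayi17753/pyonpyonkun | src/backup/commutative.py | clonee2
-- ===== SOURCE A (Python) =====
-- import itertools
--
-- def insert_char(s, char, n):
--     return s[:n - 1] + char + s[n - 1:]
--
-- def clonee2(l, multcomp, multcomppost):
--     clonelist = []
--
--     rangelist = [list(range(1, n + 1)) for n in multcomp]
--     #   for range in rangelist:
--     #       range[0] = ''
--     prodlist = list(itertools.product(*rangelist))
--     for prod in prodlist:
--         for ndex, post in zip(prod, multcomppost):  # Cartesian matrices and where to insert them
--             if ndex == 1:
--                 ndexs = ''
--             else: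
--                 ndexs = str(ndex)
--             clonelist.append(insert_char(l, ndexs, post + 2))
--
--     return clonelist    # Bear in mind: if no multcomp, clonelist = []
-- ===== SOURCE B (Python) =====
-- # Enumerate the Cartesian product by index: the k-th tuple is obtained by
-- # mixed-radix decoding of k, so no product list is ever materialized.
-- def insert_char(s, char, n):
--     return s[:n - 1] + char + s[n - 1:]
--
-- def clonee2(l, multcomp, multcomppost):
--     total = 1
--     for n in multcomp:
--         total *= max(n, 0)
--     result = []
--     for k in range(total):
--         digits = []
--         for n in reversed(multcomp):
--             digits.append(k % n + 1)
--             k //= n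
--         digits.reverse()
--         for v, post in zip(digits, multcomppost):
--             result.append(insert_char(l, '' if v == 1 else str(v), post + 2))
--     return result
-- ===== Notes on version B (the rewrite author's own statement) =====
-- stated objective: alternative
-- what changed: Instead of materializing the full itertools.product tuple list and looping over it, B enumerates the product positionally: for each index k in range(total) it mixed-radix-decodes k into the component digits and emits the variant strings, so no product list (and no per-component range list) is ever built.
import Mathlib
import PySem

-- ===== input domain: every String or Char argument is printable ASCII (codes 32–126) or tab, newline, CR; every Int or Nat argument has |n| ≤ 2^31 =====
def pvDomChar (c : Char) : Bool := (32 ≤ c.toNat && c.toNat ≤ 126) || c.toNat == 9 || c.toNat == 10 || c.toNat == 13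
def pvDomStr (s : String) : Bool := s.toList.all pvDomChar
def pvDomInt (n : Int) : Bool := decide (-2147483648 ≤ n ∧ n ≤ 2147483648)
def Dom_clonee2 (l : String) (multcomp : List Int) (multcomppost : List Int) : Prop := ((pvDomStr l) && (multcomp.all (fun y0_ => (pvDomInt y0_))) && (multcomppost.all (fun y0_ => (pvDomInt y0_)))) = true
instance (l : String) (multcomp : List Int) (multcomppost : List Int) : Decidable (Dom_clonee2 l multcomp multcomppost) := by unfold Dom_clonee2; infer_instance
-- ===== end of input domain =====

-- B enumerates the Cartesian product by index (mixed-radix decoding of k)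
-- instead of materializing the itertools.product tuple list (alternative
-- algorithm; no product list is built).

-- ===== PORT A =====
def insert_char (s : String) (char : String) (n : Int) : String :=
  PySem.Str.slice s none (some (n - 1)) ++ char ++ PySem.Str.slice s (some (n - 1)) none

-- itertools.product(*rangelist), ported by hand: first factor varies slowest
def pyProduct : List (List Int) → List (List Int)
  | [] => [[]]
  | r :: rs => r.flatMap (fun x => (pyProduct rs).map (fun t => x :: t))

def clonee2 (l : String) (multcomp : List Int) (multcomppost : List Int) : List String :=
  let rangelist := multcomp.map (fun n => PySem.List.pyRange 1 (n + 1) 1)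
  let prodlist := pyProduct rangelist
  prodlist.foldl (fun clonelist prod =>
    (prod.zip multcomppost).foldl (fun cl np =>
      let ndexs := if np.1 == 1 then "" else PySem.Int.toStr np.1
      cl ++ [insert_char l ndexs (np.2 + 2)]) clonelist) []

-- ===== PORT B =====
-- the digits / k loop of Source B: digits.append(k % n + 1); k //= n over reversed(multcomp), then digits.reverse()
def decodeB (multcomp : List Int) (k : Int) : List Int :=
  (multcomp.reverse.foldl (fun (st : Int × List Int) n =>
      (PySem.Int.floordiv st.1 n, st.2 ++ [PySem.Int.mod st.1 n + 1])) (k, [])).2.reverse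

def clonee2_alt (l : String) (multcomp : List Int) (multcomppost : List Int) : List String :=
  let total := multcomp.foldl (fun t n => t * max n 0) 1
  (PySem.List.pyRange 0 total 1).foldl (fun result k =>
    ((decodeB multcomp k).zip multcomppost).foldl (fun result vp =>
      result ++ [insert_char l (if vp.1 == 1 then "" else PySem.Int.toStr vp.1) (vp.2 + 2)]) result) []

-- ===== PRECONDITION & SPEC =====
def Spec_clonee2 (l : String) (multcomp : List Int) (multcomppost : List Int) (out : List String) : Prop := out = clonee2_alt l multcomp multcomppost
instance (l : String) (multcomp : List Int) (multcomppost : List Int) (out : List String) : Decidable (Spec_clonee2 l multcomp multcomppost out) := by unfold Spec_clonee2; infer_instance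

-- ===== CLAIM (what is proved, stated in full; the proofs are below) =====
def Claim_equal_clonee2 : Prop := ∀ (l : String) (multcomp : List Int) (multcomppost : List Int), Dom_clonee2 l multcomp multcomppost → Spec_clonee2 l multcomp multcomppost (clonee2 l multcomp multcomppost)

-- ===== LEMMAS AND PROOFS =====

-- the strings emitted for one product tuple
def emit (l : String) (posts : List Int) (prod : List Int) : List String :=
  (prod.zip posts).map (fun np =>
    insert_char l (if np.1 == 1 then "" else PySem.Int.toStr np.1) (np.2 + 2))

-- clean recursive characterisation of the mixed-radix digits
def decSpec : List Int → Int → List Int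
  | [], _ => []
  | c :: cs, k => ((k / (cs.prod)) % c + 1) :: decSpec cs k

-- an append-accumulating foldl whose step is pointwise `acc ++ g x` is a flatMap
lemma foldl_step_flatMap {α β : Type} (step : List β → α → List β) (g : α → List β)
    (h : ∀ acc x, step acc x = acc ++ g x) :
    ∀ (l : List α) (acc : List β), l.foldl step acc = acc ++ l.flatMap g := by
  intro l
  induction l with
  | nil => simp
  | cons x xs ih =>
    intro acc
    simp [List.foldl_cons, h, ih, List.flatMap_cons, List.append_assoc]

lemma prod_pos_of_all_pos {cs : List Int} (h : ∀ n ∈ cs, 1 ≤ n) : 0 < cs.prod := by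
  induction cs with
  | nil => simp
  | cons c cs ih =>
    rw [List.prod_cons]
    have hc := h c (List.mem_cons_self)
    have := ih (fun n hn => h n (List.mem_cons_of_mem _ hn))
    positivity

-- the total loop is the product of the clamped components
lemma total_eq (mc : List Int) (a : Int) :
    mc.foldl (fun t n => t * max n 0) a = a * (mc.map (fun n => max n 0)).prod := by
  induction mc generalizing a with
  | nil => simp
  | cons c cs ih => simp [List.foldl_cons, ih, mul_assoc]

-- the digits loop of Source B computes decSpec (all components positive, k ≥ 0)
lemma decode_loop_eq (cs : List Int) (h : ∀ n ∈ cs, 1 ≤ n) (k : Int)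
    (ds : List Int) :
    cs.reverse.foldl (fun (st : Int × List Int) n =>
        (PySem.Int.floordiv st.1 n, st.2 ++ [PySem.Int.mod st.1 n + 1])) (k, ds)
      = (k / cs.prod, ds ++ (decSpec cs k).reverse) := by
  induction cs generalizing ds with
  | nil => simp [decSpec]
  | cons c cs ih =>
    have hc : (1:Int) ≤ c := h c (List.mem_cons_self)
    have hcs : ∀ n ∈ cs, (1:Int) ≤ n := fun n hn => h n (List.mem_cons_of_mem _ hn)
    have hp : (0:Int) < cs.prod := prod_pos_of_all_pos hcs
    rw [List.reverse_cons, List.foldl_append, ih hcs ds]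
    simp only [List.foldl_cons, List.foldl_nil, decSpec, List.reverse_cons, Prod.mk.injEq]
    constructor
    · rw [PySem.Int.floordiv_eq_ediv_of_pos (by omega),
        Int.ediv_ediv_of_nonneg (le_of_lt hp), List.prod_cons, mul_comm]
    · rw [PySem.Int.mod_eq_emod_of_pos (by omega), List.append_assoc]

lemma decodeB_eq (mc : List Int) (h : ∀ n ∈ mc, 1 ≤ n) (k : Int) :
    decodeB mc k = decSpec mc k := by
  unfold decodeB
  rw [decode_loop_eq mc h k []]
  simp

-- shifting k by a multiple of the radix product leaves the digits unchanged
lemma decSpec_shift (cs : List Int) (h : ∀ n ∈ cs, 1 ≤ n) (i j : Int) :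
    decSpec cs (i * cs.prod + j) = decSpec cs j := by
  induction cs generalizing i with
  | nil => simp [decSpec]
  | cons c cs ih =>
    have hc : (1:Int) ≤ c := h c (List.mem_cons_self)
    have hcs : ∀ n ∈ cs, (1:Int) ≤ n := fun n hn => h n (List.mem_cons_of_mem _ hn)
    have hp : (0:Int) < cs.prod := prod_pos_of_all_pos hcs
    simp only [decSpec, List.prod_cons]
    congr 1
    · congr 1
      have : i * (c * cs.prod) + j = j + (i * c) * cs.prod := by ring
      rw [this, Int.add_mul_ediv_right _ _ (by omega : cs.prod ≠ 0),
        Int.add_mul_emod_self_right]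
    · have : i * (c * cs.prod) + j = (i * c) * cs.prod + j := by ring
      rw [this, ih hcs (i * c)]

-- List.range distributes over a product as nested loops
lemma range_mul_flatMap (c T : Nat) :
    List.range (c * T) = (List.range c).flatMap (fun i => (List.range T).map (fun j => i * T + j)) := by
  induction c with
  | zero => simp
  | succ c ih =>
    rw [Nat.succ_mul, List.range_add, ih, List.range_succ, List.flatMap_append]
    simp [Nat.add_comm]

-- decoding every k in range(total) enumerates exactly the product tuples, in order
lemma enumerate_eq (mc : List Int) (h : ∀ n ∈ mc, 1 ≤ n) :
    (PySem.List.pyRange 0 mc.prod 1).map (decSpec mc)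
      = pyProduct (mc.map (fun n => PySem.List.pyRange 1 (n + 1) 1)) := by
  induction mc with
  | nil => simp [PySem.List.pyRange_one, decSpec, pyProduct]
  | cons c cs ih =>
    have hc : (1:Int) ≤ c := h c (List.mem_cons_self)
    have hcs : ∀ n ∈ cs, (1:Int) ≤ n := fun n hn => h n (List.mem_cons_of_mem _ hn)
    have hp : (0:Int) < cs.prod := prod_pos_of_all_pos hcs
    simp only [List.map_cons, pyProduct, ← ih hcs]
    rw [PySem.List.pyRange_one 0 (c :: cs).prod, PySem.List.pyRange_one 1 (c + 1),
      PySem.List.pyRange_one 0 cs.prod]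
    have hcT : ((c :: cs).prod - 0).toNat = c.toNat * (cs.prod - 0).toNat := by
      rw [List.prod_cons, sub_zero, sub_zero, Int.toNat_mul (by omega) (by omega)]
    have he2 : ((c:Int) + 1 - 1).toNat = c.toNat := by omega
    rw [hcT, he2, range_mul_flatMap]
    simp only [List.map_flatMap, List.flatMap_map, List.map_map]
    apply List.flatMap_congr
    intro i hi
    have hiv : (i : Int) < c := by
      have := List.mem_range.mp hi
      omega
    apply List.map_congr_left
    intro j hj
    have hjv : (j : Int) < cs.prod := by
      have := List.mem_range.mp hj
      omega
    simp only [Function.comp_def]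
    have harg : (0 : Int) + ↑(i * ((cs.prod - 0).toNat) + j) = ↑i * cs.prod + (0 + ↑j) := by
      push_cast
      have : ((cs.prod - 0).toNat : Int) = cs.prod := by omega
      rw [this]; ring
    rw [harg]
    simp only [decSpec]
    congr 1
    · have hdiv : (↑i * cs.prod + (0 + ↑j)) / cs.prod = (i : Int) := by
        rw [add_comm, Int.add_mul_ediv_right _ _ (by omega : cs.prod ≠ 0),
          Int.ediv_eq_zero_of_lt (by omega) (by omega)]
        omega
      rw [hdiv, Int.emod_eq_of_lt (by omega) hiv]
      omega
    · rw [decSpec_shift cs hcs i (0 + (j:Int))]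

-- if some component is ≤ 0, its range is empty and the product list is empty
lemma pyProduct_of_mem_nil (rs : List (List Int)) (h : [] ∈ rs) : pyProduct rs = [] := by
  induction rs with
  | nil => cases h
  | cons r rest ih =>
    rcases List.mem_cons.mp h with h1 | h2
    · simp [pyProduct, ← h1]
    · simp [pyProduct, ih h2]

-- ===== VERDICT (by name: the statement is the Claim_ definition above) =====
theorem clonee2_spec : Claim_equal_clonee2 := by
  intro l multcomp multcomppost _
  show clonee2 l multcomp multcomppost = clonee2_alt l multcomp multcomppost
  simp only [clonee2, clonee2_alt]
  rw [foldl_step_flatMap _ (emit l multcomppost)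
      (by intro acc prod; exact PySem.List.foldl_append_singleton_eq_map _ _ _),
    foldl_step_flatMap _ (fun k => emit l multcomppost (decodeB multcomp k))
      (by intro acc k; exact PySem.List.foldl_append_singleton_eq_map _ _ _),
    List.nil_append, List.nil_append]
  by_cases hall : ∀ n ∈ multcomp, (1:Int) ≤ n
  · have hmm : multcomp.map (fun n => max n 0) = multcomp := by
      conv_rhs => rw [← List.map_id multcomp]
      apply List.map_congr_left
      intro n hn
      have := hall n hn
      simp only [id]
      omega
    rw [total_eq, one_mul, hmm]
    rw [← enumerate_eq multcomp hall, List.flatMap_map]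
    apply List.flatMap_congr
    intro k hk
    rw [decodeB_eq multcomp hall k]
  · push Not at hall
    obtain ⟨c, hc, hc0⟩ := hall
    have h1 : pyProduct (multcomp.map (fun n => PySem.List.pyRange 1 (n + 1) 1)) = [] := by
      apply pyProduct_of_mem_nil
      rw [show ([] : List Int) = PySem.List.pyRange 1 (c + 1) 1 from
        (PySem.List.pyRange_one_eq_nil (by omega : (c:Int) + 1 ≤ 1)).symm]
      exact List.mem_map_of_mem hc
    have h2 : (multcomp.map (fun n => max n 0)).prod = 0 := by
      apply List.prod_eq_zero
      exact List.mem_map.mpr ⟨c, hc, by omega⟩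
    rw [total_eq, one_mul, h2, h1]
    simp
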